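-- pv_equiv track=rewrite | github.com/slakshmi2312/codeconverter | backend/main.py | beautify_compact_output
-- ===== SOURCE A (Python) =====
-- def beautify_compact_output(code: str, target_lang: str) -> str:
--     out = code.strip()
--     if not out:
--         return out
--
--     if target_lang == "python":
--         # Many model responses compress statements with semicolons.
--         if "\n" not in out and ";" in out:
--             parts = [p.strip() for p in out.split(";") if p.strip()]
--             return "\n".join(parts)
--         return out
--
--     if target_lang in {"java", "javascript", "c"}:
--         return beautify_brace_language(out)
--
--     return out
--
-- def beautify_brace_language(code: str) -> str:
--     tokens = []
--     in_string = False
--     string_quote = ""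
--     escape = False
--
--     for ch in code:
--         if in_string:
--             tokens.append(ch)
--             if escape:
--                 escape = False
--             elif ch == "\\":
--                 escape = True
--             elif ch == string_quote:
--                 in_string = False
--                 string_quote = ""
--             continue
--
--         if ch in {"'", '"'}:
--             in_string = True
--             string_quote = ch
--             tokens.append(ch)
--             continue
--
--         if ch == "{":
--             tokens.append(" {\n")
--             continue
--         if ch == "}":
--             tokens.append("\n}\n")
--             continue
--         if ch == ";":
--             tokens.append(";\n")
--             continue
--
--         tokens.append(ch)
--
--     rough = "".join(tokens)
--     lines = [ln.strip() for ln in rough.splitlines() if ln.strip()]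
--     if not lines:
--         return code
--
--     formatted = []
--     indent = 0
--
--     for line in lines:
--         if line.startswith("}"):
--             indent = max(indent - 1, 0)
--
--         formatted.append(("    " * indent) + line)
--
--         if line.endswith("{"):
--             indent += 1
--
--     return "\n".join(formatted)
-- ===== SOURCE B (Python) =====
-- def beautify_compact_output(code: str, target_lang: str) -> str:
--     out = code.strip()
--     if not out:
--         return out
--
--     if target_lang == "python":
--         if "\n" not in out and ";" in out:
--             pieces = [p.strip() for p in out.split(";")]
--             return "\n".join(p for p in pieces if p)
--         return out
--
--     if target_lang in ("java", "javascript", "c"):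
--         return _reindent_single_pass(out)
--
--     return out
--
--
-- def _reindent_single_pass(code: str) -> str:
--     # One pass: string-literal state + current-segment buffer + live indent counter.
--     lines = []
--     indent = 0
--     buf = []
--     in_string = False
--     quote = ""
--     escape = False
--
--     def flush():
--         nonlocal indent
--         seg = "".join(buf).strip()
--         buf.clear()
--         if not seg:
--             return
--         if seg[0] == "}":
--             indent = max(indent - 1, 0)
--         lines.append("    " * indent + seg)
--         if seg[-1] == "{":
--             indent += 1
--
--     for ch in code:
--         if in_string:
--             if ch in "\r\n":
--                 flush()
--             else:
--                 buf.append(ch)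
--             if escape:
--                 escape = False
--             elif ch == "\\":
--                 escape = True
--             elif ch == quote:
--                 in_string = False
--                 quote = ""
--         elif ch in ("'", '"'):
--             in_string = True
--             quote = ch
--             buf.append(ch)
--         elif ch == "{":
--             buf.append(" {")
--             flush()
--         elif ch == "}":
--             flush()
--             buf.append("}")
--             flush()
--         elif ch == ";":
--             buf.append(";")
--             flush()
--         elif ch in "\r\n":
--             flush()
--         else:
--             buf.append(ch)
--     flush()
--
--     if not lines:
--         return code
--     return "\n".join(lines)
-- ===== Notes on version B (the rewrite author's own statement) =====
-- stated objective: alternative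
-- what changed: The brace-language beautifier is rewritten as a single character pass that maintains string/escape state, a current-line buffer and a live indent counter and emits each formatted line at flush boundaries, instead of A's three passes (token rewrite, splitlines+strip, indent loop).
import Mathlib
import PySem

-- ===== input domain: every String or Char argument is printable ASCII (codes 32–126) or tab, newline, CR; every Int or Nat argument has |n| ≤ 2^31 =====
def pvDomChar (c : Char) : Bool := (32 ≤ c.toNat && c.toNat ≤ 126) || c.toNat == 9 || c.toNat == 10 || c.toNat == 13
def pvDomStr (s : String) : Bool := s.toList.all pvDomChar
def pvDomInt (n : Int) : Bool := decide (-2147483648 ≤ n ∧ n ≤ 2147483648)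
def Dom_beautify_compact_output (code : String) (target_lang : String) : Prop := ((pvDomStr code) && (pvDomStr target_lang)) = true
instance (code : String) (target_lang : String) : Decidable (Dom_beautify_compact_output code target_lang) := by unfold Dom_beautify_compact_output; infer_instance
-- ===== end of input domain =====

-- B re-formats brace code in ONE fused pass (string-state + live indent + line buffer) instead of
-- A's three passes (token rewrite, splitlines/strip, indent loop); objective: alternative decomposition.


-- ===== PORT A =====
-- "    " * indent  (Python string repetition; indent is never negative)
def pvAPad (indent : Nat) : List Char := (List.replicate indent [' ', ' ', ' ', ' ']).flatten

-- the 'for ch in code' token loop of beautify_brace_language; state (tokens, in_string, string_quote, escape);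
-- string_quote is a Python str ("" when unset), kept as List Char
def pvABblLoop : List Char → List (List Char) → Bool → List Char → Bool → List (List Char)
  | [], tokens, _, _, _ => tokens
  | ch :: rest, tokens, in_string, string_quote, escape =>
    if in_string then
      let tokens := tokens ++ [[ch]]
      if escape then pvABblLoop rest tokens in_string string_quote false
      else if ch = '\\' then pvABblLoop rest tokens in_string string_quote true
      else if [ch] = string_quote then pvABblLoop rest tokens false [] escape
      else pvABblLoop rest tokens in_string string_quote escape
    else if ch = '\'' ∨ ch = '"' then pvABblLoop rest (tokens ++ [[ch]]) true [ch] escape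
    else if ch = '{' then pvABblLoop rest (tokens ++ [[' ', '{', '\n']]) in_string string_quote escape
    else if ch = '}' then pvABblLoop rest (tokens ++ [['\n', '}', '\n']]) in_string string_quote escape
    else if ch = ';' then pvABblLoop rest (tokens ++ [[';', '\n']]) in_string string_quote escape
    else pvABblLoop rest (tokens ++ [[ch]]) in_string string_quote escape

-- the 'for line in lines' indent loop; Python's max(indent - 1, 0) is Nat subtraction here
def pvABblIndent : List (List Char) → List (List Char) → Nat → List (List Char)
  | [], formatted, _ => formatted
  | line :: rest, formatted, indent =>
    let indent := if PySem.Chars.startswith line ['}'] then indent - 1 else indent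
    let formatted := formatted ++ [pvAPad indent ++ line]
    let indent := if PySem.Chars.endswith line ['{'] then indent + 1 else indent
    pvABblIndent rest formatted indent

def pvABeautifyBrace (code : List Char) : List Char :=
  let tokens := pvABblLoop code [] false [] false
  let rough := tokens.flatten
  let lines := (PySem.Chars.splitlines rough).filterMap
    (fun ln => if PySem.Chars.strip ln ≠ [] then some (PySem.Chars.strip ln) else none)
  if lines = [] then code
  else PySem.Chars.join ['\n'] (pvABblIndent lines [] 0)

def beautify_compact_output (code : String) (target_lang : String) : String :=
  let out := PySem.Chars.strip code.toList
  if out = [] then String.ofList out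
  else if target_lang = "python" then
    if ¬ PySem.Chars.isIn ['\n'] out = true ∧ PySem.Chars.isIn [';'] out = true then
      let parts := (PySem.Chars.splitOn out [';']).filterMap
        (fun p => if PySem.Chars.strip p ≠ [] then some (PySem.Chars.strip p) else none)
      String.ofList (PySem.Chars.join ['\n'] parts)
    else String.ofList out
  else if target_lang = "java" ∨ target_lang = "javascript" ∨ target_lang = "c" then
    String.ofList (pvABeautifyBrace out)
  else String.ofList out

-- ===== PORT B =====
-- "    " * indent  (Python string repetition; indent is never negative)
def pvBPad (indent : Nat) : List Char := (List.replicate indent [' ', ' ', ' ', ' ']).flatten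

-- flush(): strip the buffered segment, drop it if empty, else indent-adjust and emit one line
def pvBFlush (indent : Nat) (buf : List Char) (lines : List (List Char)) : Nat × List (List Char) :=
  let seg := PySem.Chars.strip buf
  if seg = [] then (indent, lines)
  else
    let indent := if seg.head? = some '}' then indent - 1 else indent  -- max(indent-1,0) on Nat
    let lines := lines ++ [pvBPad indent ++ seg]
    (if seg.getLast? = some '{' then indent + 1 else indent, lines)

-- the single 'for ch in code' pass of _reindent_single_pass
def pvBLoop : List Char → Bool → List Char → Bool → Nat → List Char → List (List Char) → Nat × List (List Char)
  | [], _, _, _, indent, buf, lines => pvBFlush indent buf lines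
  | ch :: rest, in_string, quote, escape, indent, buf, lines =>
    if in_string then
      let (indent, buf, lines) :=
        if ch = '\r' ∨ ch = '\n' then
          let (i, l) := pvBFlush indent buf lines
          (i, [], l)
        else (indent, buf ++ [ch], lines)
      if escape then pvBLoop rest in_string quote false indent buf lines
      else if ch = '\\' then pvBLoop rest in_string quote true indent buf lines
      else if [ch] = quote then pvBLoop rest false [] false indent buf lines
      else pvBLoop rest in_string quote escape indent buf lines
    else if ch = '\'' ∨ ch = '"' then pvBLoop rest true [ch] escape indent (buf ++ [ch]) lines
    else if ch = '{' then
      let (i, l) := pvBFlush indent (buf ++ [' ', '{']) lines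
      pvBLoop rest in_string quote escape i [] l
    else if ch = '}' then
      let (i, l) := pvBFlush indent buf lines
      let (i, l) := pvBFlush i ['}'] l
      pvBLoop rest in_string quote escape i [] l
    else if ch = ';' then
      let (i, l) := pvBFlush indent (buf ++ [';']) lines
      pvBLoop rest in_string quote escape i [] l
    else if ch = '\r' ∨ ch = '\n' then
      let (i, l) := pvBFlush indent buf lines
      pvBLoop rest in_string quote escape i [] l
    else pvBLoop rest in_string quote escape indent (buf ++ [ch]) lines

def pvBReindent (code : List Char) : List Char :=
  let (_, lines) := pvBLoop code false [] false 0 [] []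
  if lines = [] then code
  else PySem.Chars.join ['\n'] lines

def beautify_compact_output_alt (code : String) (target_lang : String) : String :=
  let out := PySem.Chars.strip code.toList
  if out = [] then String.ofList out
  else if target_lang = "python" then
    if ¬ PySem.Chars.isIn ['\n'] out = true ∧ PySem.Chars.isIn [';'] out = true then
      let pieces := (PySem.Chars.splitOn out [';']).map PySem.Chars.strip
      String.ofList (PySem.Chars.join ['\n'] (pieces.filter (fun p => !p.isEmpty)))
    else String.ofList out
  else if target_lang = "java" ∨ target_lang = "javascript" ∨ target_lang = "c" then
    String.ofList (pvBReindent out)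
  else String.ofList out

-- ===== PRECONDITION & SPEC =====
def Spec_beautify_compact_output (code : String) (target_lang : String) (out : String) : Prop := out = beautify_compact_output_alt code target_lang
instance (code : String) (target_lang : String) (out : String) : Decidable (Spec_beautify_compact_output code target_lang out) := by unfold Spec_beautify_compact_output; infer_instance

-- ===== CLAIM (what is proved, stated in full; the proofs are below) =====
def Claim_equal_beautify_compact_output : Prop := ∀ (code : String) (target_lang : String), Dom_beautify_compact_output code target_lang → Spec_beautify_compact_output code target_lang (beautify_compact_output code target_lang)


-- ===== LEMMAS AND PROOFS =====

-- break characters: the two line separators both programs can meet on the stated domain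
def pvIsBrk (c : Char) : Bool := c == '\n' || c == '\r'

-- split at every break character (keeps empty segments, keeps a trailing empty segment)
def pvSplitB (cs : List Char) : List (List Char) :=
  cs.foldr (fun c r => if pvIsBrk c then [] :: r else (c :: r.headD []) :: r.tail) [[]]

-- stripped non-empty segments: the line list both programs effectively process
def pvCooked (cs : List Char) : List (List Char) :=
  ((pvSplitB cs).map PySem.Chars.strip).filter (fun l => !l.isEmpty)

-- one indent step (the body of A's indent loop = B's flush on a non-empty stripped segment)
def pvStep (p : Nat × List (List Char)) (ln : List Char) : Nat × List (List Char) :=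
  let i := if ln.head? = some '}' then p.1 - 1 else p.1
  (if ln.getLast? = some '{' then i + 1 else i, p.2 ++ [pvBPad i ++ ln])

theorem pvSplitB_cons_brk (c : Char) (cs : List Char) (h : pvIsBrk c = true) :
    pvSplitB (c :: cs) = [] :: pvSplitB cs := by
  simp [pvSplitB, h]

theorem pvSplitB_cons_nb (c : Char) (cs : List Char) (h : pvIsBrk c = false) :
    pvSplitB (c :: cs) = (c :: (pvSplitB cs).headD []) :: (pvSplitB cs).tail := by
  simp [pvSplitB, h]

theorem pvSplitB_ne_nil (cs : List Char) : pvSplitB cs ≠ [] := by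
  cases cs with
  | nil => simp [pvSplitB]
  | cons c cs =>
    by_cases h : pvIsBrk c = true
    · rw [pvSplitB_cons_brk c cs h]; simp
    · rw [pvSplitB_cons_nb c cs (by simpa using h)]; simp

theorem pvSplitB_append (x : List Char) (cs : List Char) (h : ∀ c ∈ x, pvIsBrk c = false) :
    pvSplitB (x ++ cs) = (x ++ (pvSplitB cs).headD []) :: (pvSplitB cs).tail := by
  induction x with
  | nil =>
    simp only [List.nil_append]
    obtain ⟨s, ss, hss⟩ := List.exists_cons_of_ne_nil (pvSplitB_ne_nil cs)
    rw [hss]; rfl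
  | cons c x ih =>
    have hc : pvIsBrk c = false := h c (by simp)
    have hx : ∀ c ∈ x, pvIsBrk c = false := fun c hc => h c (by simp [hc])
    rw [List.cons_append, pvSplitB_cons_nb c (x ++ cs) hc, ih hx]
    simp

theorem pvCooked_brk (c : Char) (cs : List Char) (h : pvIsBrk c = true) :
    pvCooked (c :: cs) = pvCooked cs := by
  simp [pvCooked, pvSplitB_cons_brk c cs h, PySem.Chars.strip, PySem.Chars.lstrip, PySem.Chars.rstrip]

theorem pvCooked_one (x : List Char) (h : ∀ c ∈ x, pvIsBrk c = false) :
    pvCooked x = if PySem.Chars.strip x = [] then [] else [PySem.Chars.strip x] := by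
  have := pvSplitB_append x [] h
  simp only [List.append_nil] at this
  rw [pvCooked, this]
  simp only [pvSplitB, List.foldr_nil, List.headD_cons, List.tail_cons, List.append_nil]
  by_cases hs : PySem.Chars.strip x = [] <;> simp [hs]

theorem pvCooked_flush (x : List Char) (b : Char) (cs : List Char)
    (hx : ∀ c ∈ x, pvIsBrk c = false) (hb : pvIsBrk b = true) :
    pvCooked (x ++ b :: cs) =
      (if PySem.Chars.strip x = [] then [] else [PySem.Chars.strip x]) ++ pvCooked cs := by
  rw [pvCooked, pvSplitB_append x (b :: cs) hx, pvSplitB_cons_brk b cs hb]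
  simp only [List.headD_cons, List.tail_cons, List.append_nil, List.map_cons, List.filter_cons]
  by_cases hs : PySem.Chars.strip x = [] <;> simp [hs, pvCooked]

-- B's flush is one (conditional) indent step on the stripped buffer
theorem pvBFlush_eq (i : Nat) (buf : List Char) (lines : List (List Char))
    (h : ∀ c ∈ buf, pvIsBrk c = false) :
    pvBFlush i buf lines = List.foldl pvStep (i, lines) (pvCooked buf) := by
  rw [pvCooked_one buf h]
  by_cases hs : PySem.Chars.strip buf = [] <;> simp [pvBFlush, pvStep, hs]

-- A's token loop: the accumulator splits off
theorem pvABblLoop_acc (cs : List Char) : ∀ (tokens : List (List Char)) (inStr : Bool) (q : List Char) (esc : Bool),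
    pvABblLoop cs tokens inStr q esc = tokens ++ pvABblLoop cs [] inStr q esc := by
  induction cs with
  | nil => intro tokens inStr q esc; simp [pvABblLoop]
  | cons ch rest ih =>
    intro tokens inStr q esc
    simp only [pvABblLoop]
    split_ifs <;>
      (first
        | (rw [ih (tokens ++ [[ch]]), ih ([] ++ [[ch]])]; simp)
        | (rw [ih (tokens ++ [[' ', '{', '\n']]), ih ([] ++ [[' ', '{', '\n']])]; simp)
        | (rw [ih (tokens ++ [['\n', '}', '\n']]), ih ([] ++ [['\n', '}', '\n']])]; simp)
        | (rw [ih (tokens ++ [[';', '\n']]), ih ([] ++ [[';', '\n']])]; simp))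

-- A's rough text for a remaining input and string-state
def pvRough (cs : List Char) (inStr : Bool) (q : List Char) (esc : Bool) : List Char :=
  (pvABblLoop cs [] inStr q esc).flatten

theorem pvRough_nil (inStr : Bool) (q : List Char) (esc : Bool) : pvRough [] inStr q esc = [] := rfl


theorem pvRough_cons (ch : Char) (rest : List Char) (inStr : Bool) (q : List Char) (esc : Bool) :
    pvRough (ch :: rest) inStr q esc =
      (if inStr then
        (if esc then [ch] ++ pvRough rest inStr q false
         else if ch = '\\' then [ch] ++ pvRough rest inStr q true
         else if [ch] = q then [ch] ++ pvRough rest false [] esc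
         else [ch] ++ pvRough rest inStr q esc)
       else if ch = '\'' ∨ ch = '"' then [ch] ++ pvRough rest true [ch] esc
       else if ch = '{' then [' ', '{', '\n'] ++ pvRough rest inStr q esc
       else if ch = '}' then ['\n', '}', '\n'] ++ pvRough rest inStr q esc
       else if ch = ';' then [';', '\n'] ++ pvRough rest inStr q esc
       else [ch] ++ pvRough rest inStr q esc) := by
  simp only [pvRough, pvABblLoop]
  split_ifs <;> (rw [pvABblLoop_acc]; simp)

-- appending a break char to a break-free buffer folds as one flush
theorem pvFoldFlush (p : Nat × List (List Char)) (x : List Char) (b : Char) (r : List Char)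
    (hx : ∀ c ∈ x, pvIsBrk c = false) (hb : pvIsBrk b = true) :
    List.foldl pvStep p (pvCooked (x ++ b :: r)) =
      List.foldl pvStep (pvBFlush p.1 x p.2) (pvCooked r) := by
  obtain ⟨j, ls⟩ := p
  rw [pvCooked_flush x b r hx hb, List.foldl_append, ← pvCooked_one x hx,
    ← pvBFlush_eq j x ls hx]

-- the heart of the equivalence: B's single pass is A's cooked-line fold, resumed at (i, lines)
theorem pvMain (cs : List Char) : ∀ (inStr : Bool) (q : List Char) (esc : Bool) (i : Nat)
    (buf : List Char) (lines : List (List Char)), (∀ c ∈ buf, pvIsBrk c = false) →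
    pvBLoop cs inStr q esc i buf lines =
      List.foldl pvStep (i, lines) (pvCooked (buf ++ pvRough cs inStr q esc)) := by
  induction cs with
  | nil =>
    intro inStr q esc i buf lines hbuf
    simp only [pvBLoop, pvRough_nil, List.append_nil]
    exact pvBFlush_eq i buf lines hbuf
  | cons ch rest ih =>
    intro inStr q esc i buf lines hbuf
    have hext : ∀ (c : Char), pvIsBrk c = false → ∀ x ∈ buf ++ [c], pvIsBrk x = false := by
      intro c hc x hx
      rcases List.mem_append.1 hx with h | h
      · exact hbuf x h
      · simp at h; subst h; exact hc
    by_cases hin : inStr = true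
    · subst hin
      by_cases hbrk : ch = '\r' ∨ ch = '\n'
      · have hb : pvIsBrk ch = true := by rcases hbrk with h | h <;> subst h <;> rfl
        simp only [pvBLoop, pvRough_cons, if_pos trivial, if_pos hbrk]
        split_ifs with h1 h2 h3 <;>
          (try rw [show esc = false by simpa using h1]) <;>
          (rw [ih _ _ _ _ [] _ (by simp)]
           simp only [List.nil_append, List.singleton_append]
           rw [pvFoldFlush (i, lines) buf ch _ hbuf hb]
           try simp)
      · have hnb : pvIsBrk ch = false := by
          push_neg at hbrk
          simp [pvIsBrk, hbrk.1, hbrk.2]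
        simp only [pvBLoop, pvRough_cons, if_pos trivial, if_neg hbrk]
        split_ifs with h1 h2 h3 <;>
          (try rw [show esc = false by simpa using h1]) <;>
          (rw [ih _ _ _ _ (buf ++ [ch]) _ (hext ch hnb)]
           simp [List.append_assoc])
    · have hin' : inStr = false := by simpa using hin
      subst hin'
      simp only [pvBLoop, pvRough_cons, Bool.false_eq_true, if_neg (by simp : ¬False)]
      by_cases hq : ch = '\'' ∨ ch = '"'
      · have hnb : pvIsBrk ch = false := by rcases hq with h | h <;> subst h <;> rfl
        simp only [if_pos hq]
        rw [ih _ _ _ _ (buf ++ [ch]) _ (hext ch hnb)]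
        simp [List.append_assoc]
      · simp only [if_neg hq]
        by_cases hbc : ch = '{'
        · simp only [if_pos hbc]
          rw [ih _ _ _ _ [] _ (by simp)]
          rw [show buf ++ ([' ', '{', '\n'] ++ pvRough rest false q esc)
              = (buf ++ [' ', '{']) ++ '\n' :: pvRough rest false q esc by simp [List.append_assoc]]
          rw [pvFoldFlush (i, lines) (buf ++ [' ', '{']) '\n' _
            (by
              intro x hx
              rcases List.mem_append.1 hx with h | h
              · exact hbuf x h
              · simp at h; rcases h with h | h <;> subst h <;> rfl) rfl]
          simp
        · simp only [if_neg hbc]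
          by_cases hcc : ch = '}'
          · simp only [if_pos hcc]
            rw [ih _ _ _ _ [] _ (by simp)]
            rw [show buf ++ (['\n', '}', '\n'] ++ pvRough rest false q esc)
                = buf ++ '\n' :: ('}' :: '\n' :: pvRough rest false q esc) by simp]
            rw [pvFoldFlush (i, lines) buf '\n' _ hbuf rfl]
            rw [show ('}' :: '\n' :: pvRough rest false q esc)
                = ['}'] ++ '\n' :: pvRough rest false q esc by rfl]
            rw [pvFoldFlush (pvBFlush i buf lines) ['}'] '\n' _
              (by intro x hx; simp at hx; subst hx; rfl) rfl]
            simp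
          · simp only [if_neg hcc]
            by_cases hsc : ch = ';'
            · simp only [if_pos hsc]
              rw [ih _ _ _ _ [] _ (by simp)]
              rw [show buf ++ ([';', '\n'] ++ pvRough rest false q esc)
                  = (buf ++ [';']) ++ '\n' :: pvRough rest false q esc by simp [List.append_assoc]]
              rw [pvFoldFlush (i, lines) (buf ++ [';']) '\n' _
                (by
                  intro x hx
                  rcases List.mem_append.1 hx with h | h
                  · exact hbuf x h
                  · simp at h; subst h; rfl) rfl]
              simp
            · simp only [if_neg hsc]
              by_cases hbrk : ch = '\r' ∨ ch = '\n'
              · have hb : pvIsBrk ch = true := by rcases hbrk with h | h <;> subst h <;> rfl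
                simp only [if_pos hbrk]
                rw [ih _ _ _ _ [] _ (by simp)]
                simp only [List.singleton_append]
                rw [pvFoldFlush (i, lines) buf ch _ hbuf hb]
                simp
              · have hnb : pvIsBrk ch = false := by
                  push_neg at hbrk
                  simp [pvIsBrk, hbrk.1, hbrk.2]
                simp only [if_neg hbrk]
                rw [ih _ _ _ _ (buf ++ [ch]) _ (hext ch hnb)]
                simp [List.append_assoc]

theorem pvGoCons (isB : Char → Bool) (c : Char) (rest cur : List Char) (acc : List (List Char))
    (h1 : ¬(c = '\r' ∧ rest.head? = some '\n')) :
    PySem.Chars.splitlines.go isB (c :: rest) cur acc =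
      if isB c then PySem.Chars.splitlines.go isB rest [] (cur.reverse :: acc)
      else PySem.Chars.splitlines.go isB rest (c :: cur) acc := by
  rw [PySem.Chars.splitlines.go.eq_def]
  split
  · rename_i heq; exact absurd heq (by simp)
  · rename_i heq
    injection heq with ha hb
    exact absurd ⟨ha, by rw [hb]; rfl⟩ h1
  · rename_i heq
    injection heq with ha hb
    subst ha; subst hb; rfl

theorem pvCharEq (c : Char) (n : Char) (h : c.toNat = n.toNat) : c = n := by
  apply Char.ext
  apply UInt32.toNat_inj.mp
  exact h

theorem pvCooked_nil : pvCooked [] = [] := by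
  rw [pvCooked_one [] (by simp)]; simp [PySem.Chars.strip, PySem.Chars.lstrip, PySem.Chars.rstrip]

-- Python's splitlines, restricted to domain characters and followed by strip-and-drop-empties,
-- agrees with the simple break-at-\n-or-\r segmentation
theorem pvGoLemma (isB : Char → Bool) (hiso : ∀ c, pvDomChar c = true → isB c = pvIsBrk c) :
    ∀ (n : Nat) (cs : List Char), cs.length ≤ n → ∀ (cur : List Char) (acc : List (List Char)),
      (∀ c ∈ cs, pvDomChar c = true) → (∀ c ∈ cur, pvIsBrk c = false) →
      ((PySem.Chars.splitlines.go isB cs cur acc).map PySem.Chars.strip).filter (fun l => !l.isEmpty)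
        = ((acc.reverse.map PySem.Chars.strip).filter (fun l => !l.isEmpty))
            ++ pvCooked (cur.reverse ++ cs) := by
  intro n
  induction n with
  | zero =>
    intro cs hlen cur acc hdom hcur
    have hcs : cs = [] := List.length_eq_zero_iff.mp (Nat.le_zero.mp hlen)
    subst hcs
    rw [show PySem.Chars.splitlines.go isB [] cur acc
        = if cur.isEmpty then acc.reverse else (cur.reverse :: acc).reverse from rfl]
    by_cases hc : cur = []
    · subst hc; simp [pvCooked_nil]
    · rw [if_neg (by simpa using hc), List.reverse_cons, List.append_nil]
      rw [pvCooked_one cur.reverse (by intro c hcm; exact hcur c (List.mem_reverse.mp hcm))]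
      by_cases hs : PySem.Chars.strip cur.reverse = [] <;>
        simp [hs, List.filter_append]
  | succ n ihn =>
    intro cs hlen cur acc hdom hcur
    match cs with
    | [] => exact ihn [] (by simp) cur acc hdom hcur
    | '\r' :: '\n' :: rest =>
      rw [show PySem.Chars.splitlines.go isB ('\r' :: '\n' :: rest) cur acc
          = PySem.Chars.splitlines.go isB rest [] (cur.reverse :: acc) from rfl]
      rw [ihn rest (by simp at hlen ⊢; omega) [] (cur.reverse :: acc)
        (fun c hc => hdom c (by simp [hc])) (by simp)]
      rw [pvCooked_flush cur.reverse '\r' ('\n' :: rest)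
        (fun c hcm => hcur c (List.mem_reverse.mp hcm)) rfl]
      rw [pvCooked_brk '\n' rest rfl, List.reverse_cons]
      by_cases hs : PySem.Chars.strip cur.reverse = [] <;>
        simp [hs, List.filter_append, List.append_assoc]
    | c :: rest =>
      by_cases hcr : c = '\r' ∧ rest.head? = some '\n'
      · obtain ⟨hc1, hc2⟩ := hcr
        match rest, hc2 with
        | c2 :: rest', hc2 =>
          have : c2 = '\n' := by simpa using hc2
          subst this; subst hc1
          rw [show PySem.Chars.splitlines.go isB ('\r' :: '\n' :: rest') cur acc
              = PySem.Chars.splitlines.go isB rest' [] (cur.reverse :: acc) from rfl]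
          rw [ihn rest' (by simp at hlen ⊢; omega) [] (cur.reverse :: acc)
            (fun x hx => hdom x (by simp [hx])) (by simp)]
          rw [pvCooked_flush cur.reverse '\r' ('\n' :: rest')
            (fun x hx => hcur x (List.mem_reverse.mp hx)) rfl]
          rw [pvCooked_brk '\n' rest' rfl, List.reverse_cons]
          by_cases hs : PySem.Chars.strip cur.reverse = [] <;>
            simp [hs, List.filter_append, List.append_assoc]
      · rw [pvGoCons isB c rest cur acc hcr]
        have hcd : pvDomChar c = true := hdom c (by simp)
        rw [hiso c hcd]
        by_cases hbk : pvIsBrk c = true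
        · rw [if_pos hbk]
          rw [ihn rest (by simp at hlen ⊢; omega) [] (cur.reverse :: acc)
            (fun x hx => hdom x (by simp [hx])) (by simp)]
          rw [pvCooked_flush cur.reverse c rest
            (fun x hx => hcur x (List.mem_reverse.mp hx)) hbk]
          rw [List.reverse_cons]
          by_cases hs : PySem.Chars.strip cur.reverse = [] <;>
            simp [hs, List.filter_append, List.append_assoc]
        · rw [if_neg hbk]
          rw [ihn rest (by simp at hlen ⊢; omega) (c :: cur) acc
            (fun x hx => hdom x (by simp [hx]))
            (by
              intro x hx
              rcases List.mem_cons.mp hx with h | h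
              · subst h; simpa using hbk
              · exact hcur x h)]
          rw [List.reverse_cons]
          simp [List.append_assoc]

theorem pvHead_single (l : List Char) (a : Char) :
    PySem.Chars.startswith l [a] = decide (l.head? = some a) := by
  cases l with
  | nil => simp [PySem.Chars.startswith, List.isPrefixOf]
  | cons x xs =>
    rw [show PySem.Chars.startswith (x :: xs) [a] = (a == x && List.isPrefixOf [] xs) from rfl]
    rw [show List.isPrefixOf ([] : List Char) xs = true from rfl]
    rw [Bool.and_true, Bool.eq_iff_iff]
    simp only [beq_iff_eq, decide_eq_true_eq, List.head?_cons, Option.some.injEq]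
    exact eq_comm

theorem pvPrefix_single (a : Char) (l : List Char) : [a] <+: l ↔ l.head? = some a := by
  cases l with
  | nil => simp
  | cons x xs =>
    constructor
    · intro h
      obtain ⟨t, ht⟩ := h
      injection ht with h1 _
      simp [h1]
    · intro h
      simp at h
      exact ⟨xs, by simp [h]⟩

theorem pvLast_single (l : List Char) (a : Char) :
    PySem.Chars.endswith l [a] = decide (l.getLast? = some a) := by
  have h1 : PySem.Chars.endswith l [a] = true ↔ l.getLast? = some a := by
    rw [PySem.Chars.endswith, List.isSuffixOf_iff_suffix]
    rw [← List.reverse_prefix]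
    simp only [List.reverse_singleton]
    rw [pvPrefix_single a l.reverse, List.head?_reverse]
  cases hb : PySem.Chars.endswith l [a] with
  | true => exact (decide_eq_true (h1.mp hb)).symm
  | false =>
    symm
    apply decide_eq_false
    intro hc
    rw [h1.mpr hc] at hb
    exact absurd hb (by simp)

-- A's indent loop is the fold of pvStep (pvAPad and pvBPad are the same padding)
theorem pvABblIndent_eq (lines : List (List Char)) :
    ∀ (formatted : List (List Char)) (indent : Nat),
    pvABblIndent lines formatted indent = (List.foldl pvStep (indent, formatted) lines).2 := by
  induction lines with
  | nil => intro formatted indent; rfl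
  | cons line rest ih =>
    intro formatted indent
    simp only [pvABblIndent, List.foldl_cons]
    rw [pvHead_single, pvLast_single, ih]
    simp only [pvStep, pvAPad, pvBPad, decide_eq_true_eq]

-- the Python list comprehension [x.strip() for x in L if x.strip()] as map-then-filter
theorem pvFilterMapStrip (L : List (List Char)) :
    L.filterMap (fun p => if PySem.Chars.strip p ≠ [] then some (PySem.Chars.strip p) else none)
      = (L.map PySem.Chars.strip).filter (fun l => !l.isEmpty) := by
  induction L with
  | nil => rfl
  | cons x xs ih =>
    rw [List.filterMap_cons, List.map_cons, List.filter_cons]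
    by_cases hx : PySem.Chars.strip x = []
    · rw [show (if PySem.Chars.strip x ≠ [] then some (PySem.Chars.strip x) else none) = none by
        rw [hx]; simp]
      rw [show (!(PySem.Chars.strip x).isEmpty) = false by rw [hx]; rfl]
      exact ih
    · rw [show (if PySem.Chars.strip x ≠ [] then some (PySem.Chars.strip x) else none)
          = some (PySem.Chars.strip x) by simp [hx]]
      rw [show (!(PySem.Chars.strip x).isEmpty) = true by simpa using hx]
      rw [ih]
      rfl

-- every character of A's rough text is a domain character
theorem pvRough_dom (cs : List Char) : ∀ (tokens : List (List Char)) (inStr : Bool) (q : List Char)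
    (esc : Bool), (∀ c ∈ cs, pvDomChar c = true) → (∀ c ∈ tokens.flatten, pvDomChar c = true) →
    ∀ c ∈ (pvABblLoop cs tokens inStr q esc).flatten, pvDomChar c = true := by
  induction cs with
  | nil => intro tokens _ _ _ _ htok; simpa [pvABblLoop] using htok
  | cons ch rest ih =>
    intro tokens inStr q esc hdom htok
    have hch : pvDomChar ch = true := hdom ch (by simp)
    have hrest : ∀ c ∈ rest, pvDomChar c = true := fun c hc => hdom c (by simp [hc])
    have hnew : ∀ (t : List Char), (∀ c ∈ t, pvDomChar c = true) →
        ∀ c ∈ (tokens ++ [t]).flatten, pvDomChar c = true := by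
      intro t ht c hc
      rw [List.flatten_append] at hc
      rcases List.mem_append.mp hc with h | h
      · exact htok c h
      · exact ht c (by simpa using h)
    simp only [pvABblLoop]
    split_ifs <;>
      apply ih _ _ _ _ hrest <;>
      (first
        | exact hnew [ch] (by intro c hc; simp at hc; subst hc; exact hch)
        | exact hnew [' ', '{', '\n'] (by intro c hc; fin_cases hc <;> rfl)
        | exact hnew ['\n', '}', '\n'] (by intro c hc; fin_cases hc <;> rfl)
        | exact hnew [';', '\n'] (by intro c hc; fin_cases hc <;> rfl))

-- each folded line appends exactly one formatted line
theorem pvFoldLen (L : List (List Char)) : ∀ (i : Nat) (ls : List (List Char)),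
    (List.foldl pvStep (i, ls) L).2.length = ls.length + L.length := by
  induction L with
  | nil => intro i ls; rfl
  | cons x xs ih =>
    intro i ls
    simp only [List.foldl_cons, pvStep]
    rw [ih]
    simp
    omega

theorem pvMemStrip (c : Char) (l : List Char) (h : c ∈ PySem.Chars.strip l) : c ∈ l := by
  simp only [PySem.Chars.strip, PySem.Chars.rstrip, PySem.Chars.lstrip] at h
  rw [List.mem_reverse] at h
  have h2 := (List.dropWhile_sublist _).subset h
  rw [List.mem_reverse] at h2
  exact (List.dropWhile_sublist _).subset h2

-- splitlines + strip + drop-empties = pvCooked, on domain text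
theorem pvSplitlinesCooked (cs : List Char) (hdom : ∀ c ∈ cs, pvDomChar c = true) :
    ((PySem.Chars.splitlines cs).map PySem.Chars.strip).filter (fun l => !l.isEmpty)
      = pvCooked cs := by
  rw [show PySem.Chars.splitlines cs
      = PySem.Chars.splitlines.go
          (fun c =>
            decide (c.toNat = 10) || decide (c.toNat = 13) || decide (c.toNat = 11) ||
              decide (c.toNat = 12) || decide (c.toNat = 28) || decide (c.toNat = 29) ||
              decide (c.toNat = 30) || decide (c.toNat = 133) || decide (c.toNat = 8232) ||
              decide (c.toNat = 8233))
          cs [] [] from rfl]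
  rw [pvGoLemma _ ?hiso cs.length cs le_rfl [] [] hdom (by simp)]
  · simp
  case hiso =>
    intro c hc
    rw [Bool.eq_iff_iff]
    simp only [Bool.or_eq_true, decide_eq_true_eq, pvIsBrk, beq_iff_eq]
    simp only [pvDomChar, Bool.or_eq_true, Bool.and_eq_true, decide_eq_true_eq, beq_iff_eq] at hc
    constructor
    · intro h
      rcases h with ((((((((h | h) | h) | h) | h) | h) | h) | h) | h) | h
      · exact Or.inl (pvCharEq c '\n' (by rw [h]; rfl))
      · exact Or.inr (pvCharEq c '\r' (by rw [h]; rfl))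
      all_goals (exfalso; omega)
    · rintro (rfl | rfl) <;> simp

-- the two brace re-formatters agree on domain text
theorem pvBrace_eq (out : List Char) (hdom : ∀ c ∈ out, pvDomChar c = true) :
    pvABeautifyBrace out = pvBReindent out := by
  have hrdom : ∀ c ∈ pvRough out false [] false, pvDomChar c = true :=
    pvRough_dom out [] false [] false hdom (by simp)
  have hlines : (pvABblLoop out [] false [] false).flatten = pvRough out false [] false := rfl
  have hB : pvBLoop out false [] false 0 [] []
      = List.foldl pvStep (0, []) (pvCooked (pvRough out false [] false)) := by
    have := pvMain out false [] false 0 [] [] (by simp)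
    simpa using this
  simp only [pvABeautifyBrace, pvBReindent, hB, hlines]
  rw [pvFilterMapStrip, pvSplitlinesCooked _ hrdom]
  have hlen := pvFoldLen (pvCooked (pvRough out false [] false)) 0 []
  by_cases hnil : pvCooked (pvRough out false [] false) = []
  · rw [hnil] at hlen ⊢
    simp at hlen
    rw [if_pos rfl, if_pos (List.length_eq_zero_iff.mp (by simpa using hlen))]
  · rw [if_neg hnil, if_neg (by
      intro h
      rw [h] at hlen
      simp at hlen
      exact hnil (List.length_eq_zero_iff.mp (by omega))),
      pvABblIndent_eq]

-- ===== VERDICT (by name: the statement is the Claim_ definition above) =====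
set_option maxHeartbeats 2000000 in
theorem beautify_compact_output_spec : Claim_equal_beautify_compact_output := by
  intro code target_lang hdom
  unfold Spec_beautify_compact_output
  have hout : ∀ c ∈ PySem.Chars.strip code.toList, pvDomChar c = true := by
    intro c hc
    have hcode : ∀ c ∈ code.toList, pvDomChar c = true := by
      have := (Bool.and_eq_true _ _).mp hdom
      simpa [pvDomStr, List.all_eq_true] using this.1
    exact hcode c (pvMemStrip c code.toList hc)
  simp only [beautify_compact_output, beautify_compact_output_alt]
  split_ifs <;> first
    | rfl
    | (rw [pvFilterMapStrip])
    | (rw [pvBrace_eq _ hout])
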